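-- pv_equiv track=rewrite | github.com/alissagieben/Thesis_Code | no_comm/agent.py | DetermineBestCard
-- ===== SOURCE A (Python) =====
-- def DetermineBestCard(upPiles, downPiles, agentHand):
--     bestCardIndex = 0
--     jump = 100
--     oppositeDirection = 0
--     up = 0
--     down = 0
--     whatPile = 0
--
--     #loop through all cards in hand
--     for j in range(len(agentHand)):
--         #loop through the up/down piles
--         for k in range(len(upPiles)):
--             #check if a card in the opposite direction can be played onto an up-pile
--             if upPiles[k] - 10 == agentHand[j]:
--                 bestCardIndex = j
--                 oppositeDirection = 1
--                 up = 1
--                 down = 0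
--                 whatPile = k
--                 jump = 0
--                 break
--             #check if a card in the opposite direction can be played onto a down-pile
--             if downPiles[k] + 10 == agentHand[j]:
--                 bestCardIndex = j
--                 oppositeDirection = 1
--                 down = 1
--                 up = 0
--                 whatPile = k
--                 jump = 0
--                 break
--             #check optimal card to play onto the up-piles
--             if agentHand[j] - upPiles[k] < jump and agentHand[j] - upPiles[k] > 0:
--                 bestCardIndex = j
--                 jump = agentHand[j] - upPiles[k]
--                 up = 1
--                 down = 0
--                 whatPile = k
--             #check optimal card to play onto the down-piles
--             if downPiles[k] - agentHand[j] < jump and downPiles[k] - agentHand[j] > 0: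
--                 bestCardIndex = j
--                 jump = downPiles[k] - agentHand[j]
--                 up = 0
--                 down = 1
--                 whatPile = k
--         if oppositeDirection == 1:
--             break
--
--     return bestCardIndex, jump, oppositeDirection, up, down, whatPile
-- ===== SOURCE B (Python) =====
-- def DetermineBestCard(upPiles, downPiles, agentHand):
--     # Phase 1: an opposite-direction play wins outright; return the first one.
--     for j, card in enumerate(agentHand):
--         for k in range(len(upPiles)):
--             if upPiles[k] - 10 == card:
--                 return j, 0, 1, 1, 0, k
--             if downPiles[k] + 10 == card:
--                 return j, 0, 1, 0, 1, k
--     # Phase 2: no opposite play exists; pick the smallest jump (first wins ties).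
--     best = (0, 100, 0, 0, 0, 0)
--     for j, card in enumerate(agentHand):
--         for k in range(len(upPiles)):
--             d = card - upPiles[k]
--             if 0 < d < best[1]:
--                 best = (j, d, 0, 1, 0, k)
--             d = downPiles[k] - card
--             if 0 < d < best[1]:
--                 best = (j, d, 0, 0, 1, k)
--     return best
-- ===== Notes on version B (the rewrite author's own statement) =====
-- stated objective: simpler
-- what changed: B splits A's single interleaved loop with break-flag state into two independent phases: an early-return scan for the first opposite-direction play, then a plain best-jump accumulation over all pairs with no break or flag logic.
-- outside the precondition, e.g. on DetermineBestCard([11], [], [1]): A returns (0, 0, 1, 1, 0, 0), B returns (0, 0, 1, 1, 0, 0)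
import Mathlib
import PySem

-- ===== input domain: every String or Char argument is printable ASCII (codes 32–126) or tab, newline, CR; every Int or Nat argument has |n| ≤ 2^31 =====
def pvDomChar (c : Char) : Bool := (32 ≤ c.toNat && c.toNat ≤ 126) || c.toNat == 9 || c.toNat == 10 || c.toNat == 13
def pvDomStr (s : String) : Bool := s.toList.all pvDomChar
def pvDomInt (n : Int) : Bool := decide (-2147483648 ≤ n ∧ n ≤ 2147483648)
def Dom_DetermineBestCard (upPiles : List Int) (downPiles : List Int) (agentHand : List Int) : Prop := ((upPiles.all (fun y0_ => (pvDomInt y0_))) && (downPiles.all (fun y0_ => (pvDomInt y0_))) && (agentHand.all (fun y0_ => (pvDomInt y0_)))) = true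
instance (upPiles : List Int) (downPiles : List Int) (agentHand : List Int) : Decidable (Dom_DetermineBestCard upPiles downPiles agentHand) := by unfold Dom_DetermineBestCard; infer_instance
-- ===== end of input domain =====

-- B replaces A's interleaved loop with break-flag state by two independent phases
-- (first opposite-direction match, else plain best-jump accumulation): simpler decomposition, same cost.
-- Pre_ excludes inputs where indexing downPiles[k] for k in range(len(upPiles)) can raise IndexError;
-- it thereby also excludes some inputs where an early opposite-direction match returns before the bad index.


-- ===== PORT A =====
-- inner 'for k' loop of A: break via early return carrying the fully reassigned state
def aInner (U D : List Int) (c : Int) (j : Int) :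
    List Nat → Int × Int × Int × Int × Int × Int → Int × Int × Int × Int × Int × Int
  | [], st => st
  | k :: ks, st =>
    if U.getD k 0 - 10 = c then (j, 0, 1, 1, 0, (k : Int))
    else if D.getD k 0 + 10 = c then (j, 0, 1, 0, 1, (k : Int))
    else
      let st1 := if c - U.getD k 0 < st.2.1 ∧ c - U.getD k 0 > 0 then
          (j, c - U.getD k 0, st.2.2.1, 1, 0, (k : Int)) else st
      let st2 := if D.getD k 0 - c < st1.2.1 ∧ D.getD k 0 - c > 0 then
          (j, D.getD k 0 - c, st1.2.2.1, 0, 1, (k : Int)) else st1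
      aInner U D c j ks st2

-- outer 'for j' loop of A, with the 'if oppositeDirection == 1: break'
def aOuter (U D H : List Int) :
    List Nat → Int × Int × Int × Int × Int × Int → Int × Int × Int × Int × Int × Int
  | [], st => st
  | j :: js, st =>
    let st' := aInner U D (H.getD j 0) (j : Int) (List.range U.length) st
    if st'.2.2.1 = 1 then st' else aOuter U D H js st'

def DetermineBestCard (upPiles : List Int) (downPiles : List Int) (agentHand : List Int) : Int × Int × Int × Int × Int × Int :=
  aOuter upPiles downPiles agentHand (List.range agentHand.length) (0, 100, 0, 0, 0, 0)

-- ===== PORT B =====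
-- phase 1 inner scan: first opposite-direction play on piles k, else none
def bFind (U D : List Int) (c : Int) (j : Int) : List Nat → Option (Int × Int × Int × Int × Int × Int)
  | [] => none
  | k :: ks =>
    if U.getD k 0 - 10 = c then some (j, 0, 1, 1, 0, (k : Int))
    else if D.getD k 0 + 10 = c then some (j, 0, 1, 0, 1, (k : Int))
    else bFind U D c j ks

-- phase 1 over the hand
def bPhase1 (U D H : List Int) : List Nat → Option (Int × Int × Int × Int × Int × Int)
  | [] => none
  | j :: js =>
    match bFind U D (H.getD j 0) (j : Int) (List.range U.length) with
    | some r => some r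
    | none => bPhase1 U D H js

-- phase 2 inner accumulation for one card (no break, no flag)
def bStep (U D : List Int) (c : Int) (j : Int) :
    List Nat → Int × Int × Int × Int × Int × Int → Int × Int × Int × Int × Int × Int
  | [], best => best
  | k :: ks, best =>
    let b1 := if 0 < c - U.getD k 0 ∧ c - U.getD k 0 < best.2.1 then
        (j, c - U.getD k 0, (0 : Int), 1, 0, (k : Int)) else best
    let b2 := if 0 < D.getD k 0 - c ∧ D.getD k 0 - c < b1.2.1 then
        (j, D.getD k 0 - c, (0 : Int), 0, 1, (k : Int)) else b1
    bStep U D c j ks b2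

-- phase 2 over the hand
def bPhase2 (U D H : List Int) :
    List Nat → Int × Int × Int × Int × Int × Int → Int × Int × Int × Int × Int × Int
  | [], best => best
  | j :: js, best => bPhase2 U D H js (bStep U D (H.getD j 0) (j : Int) (List.range U.length) best)

def DetermineBestCard_alt (upPiles : List Int) (downPiles : List Int) (agentHand : List Int) : Int × Int × Int × Int × Int × Int :=
  match bPhase1 upPiles downPiles agentHand (List.range agentHand.length) with
  | some r => r
  | none => bPhase2 upPiles downPiles agentHand (List.range agentHand.length) (0, 100, 0, 0, 0, 0)

-- ===== PRECONDITION & SPEC =====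
-- Pre_ excludes inputs where A's downPiles[k] (k ranging over len(upPiles)) can raise IndexError;
-- a few such inputs still return in A via an early opposite-direction break (see claim cites).
def Pre_DetermineBestCard (upPiles : List Int) (downPiles : List Int) (agentHand : List Int) : Prop :=
  upPiles.length ≤ downPiles.length
instance (upPiles : List Int) (downPiles : List Int) (agentHand : List Int) : Decidable (Pre_DetermineBestCard upPiles downPiles agentHand) := by unfold Pre_DetermineBestCard; infer_instance

def pvWitness_DetermineBestCard : List Int × List Int × List Int := ([1, 50], [100, 60], [5, 40])

def Spec_DetermineBestCard (upPiles : List Int) (downPiles : List Int) (agentHand : List Int) (out : Int × Int × Int × Int × Int × Int) : Prop := out = DetermineBestCard_alt upPiles downPiles agentHand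
instance (upPiles : List Int) (downPiles : List Int) (agentHand : List Int) (out : Int × Int × Int × Int × Int × Int) : Decidable (Spec_DetermineBestCard upPiles downPiles agentHand out) := by unfold Spec_DetermineBestCard; infer_instance

-- ===== CLAIM (what is proved, stated in full; the proofs are below) =====
def Claim_equal_DetermineBestCard : Prop := ∀ (upPiles : List Int) (downPiles : List Int) (agentHand : List Int), Dom_DetermineBestCard upPiles downPiles agentHand → Pre_DetermineBestCard upPiles downPiles agentHand → Spec_DetermineBestCard upPiles downPiles agentHand (DetermineBestCard upPiles downPiles agentHand)

-- ===== LEMMAS AND PROOFS =====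

-- bStep keeps the oppositeDirection field at 0
lemma bStep_opp (U D : List Int) (c : Int) (j : Int) (ks : List Nat)
    (st : Int × Int × Int × Int × Int × Int) (h : st.2.2.1 = 0) :
    (bStep U D c j ks st).2.2.1 = 0 := by
  induction ks generalizing st with
  | nil => exact h
  | cons k ks ih =>
    simp only [bStep]
    apply ih
    split_ifs <;> simp_all

-- any result of bFind has oppositeDirection = 1
lemma bFind_opp (U D : List Int) (c : Int) (j : Int) (ks : List Nat)
    (r : Int × Int × Int × Int × Int × Int) (h : bFind U D c j ks = some r) :
    r.2.2.1 = 1 := by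
  induction ks with
  | nil => simp [bFind] at h
  | cons k ks ih =>
    simp only [bFind] at h
    split_ifs at h with h1 h2
    · cases h; rfl
    · cases h; rfl
    · exact ih h

-- A's inner loop = first opposite match, else B's accumulation step
lemma inner_eq (U D : List Int) (c : Int) (j : Int) (ks : List Nat)
    (st : Int × Int × Int × Int × Int × Int) (hopp : st.2.2.1 = 0) :
    aInner U D c j ks st =
      (match bFind U D c j ks with
       | some r => r
       | none => bStep U D c j ks st) := by
  induction ks generalizing st with
  | nil => rfl
  | cons k ks ih =>
    obtain ⟨b, jm, op, uu, dd, p⟩ := st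
    simp only [] at hopp
    subst hopp
    by_cases h1 : U.getD k 0 - 10 = c
    · simp only [aInner, bFind, if_pos h1]
    by_cases h2 : D.getD k 0 + 10 = c
    · simp only [aInner, bFind, if_neg h1, if_pos h2]
    simp only [aInner, bFind, if_neg h1, if_neg h2, bStep, gt_iff_lt, and_comm, apply_ite
      (fun st : Int × Int × Int × Int × Int × Int => st.2.1),
      apply_ite (fun st : Int × Int × Int × Int × Int × Int => st.2.2.1), ite_self]
    exact ih _ (by split_ifs <;> rfl)

-- A's outer loop = phase 1 result if any, else phase 2
lemma outer_eq (U D H : List Int) (js : List Nat)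
    (st : Int × Int × Int × Int × Int × Int) (hopp : st.2.2.1 = 0) :
    aOuter U D H js st =
      (match bPhase1 U D H js with
       | some r => r
       | none => bPhase2 U D H js st) := by
  induction js generalizing st with
  | nil => rfl
  | cons j js ih =>
    simp only [aOuter, bPhase1, bPhase2]
    rw [inner_eq U D (H.getD j 0) (j : Int) _ st hopp]
    cases hf : bFind U D (H.getD j 0) (j : Int) (List.range U.length) with
    | some r => simp [bFind_opp _ _ _ _ _ _ hf]
    | none =>
      have h0 : ∀ cc : Int, (bStep U D cc (j : Int) (List.range U.length) st).2.2.1 = 0 :=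
        fun cc => bStep_opp _ _ _ _ _ _ hopp
      rw [if_neg (by simp [h0])]
      exact ih _ (h0 _)

-- ===== VERDICT (by name: the statement is the Claim_ definition above) =====
theorem DetermineBestCard_spec : Claim_equal_DetermineBestCard := by
  intro U D H _ _
  unfold Spec_DetermineBestCard DetermineBestCard DetermineBestCard_alt
  exact outer_eq U D H (List.range H.length) (0, 100, 0, 0, 0, 0) rfl
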